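-- pv_equiv track=rewrite | github.com/virtool/virtool | virtool/sample_analysis.py | coverage_to_coordinates
-- ===== SOURCE A (Python) =====
-- def coverage_to_coordinates(coverage_list):
--     previous_depth = coverage_list[0]
--     coordinates = {(0, previous_depth)}
--
--     last = len(coverage_list) - 1
--
--     for i, depth in enumerate(coverage_list):
--         if depth != previous_depth or i == last:
--             coordinates.add((i - 1, previous_depth))
--             coordinates.add((i, depth))
--
--             previous_depth = depth
--
--     coordinates = sorted(list(coordinates), key=lambda x: x[0])
--
--     return coordinates
-- ===== SOURCE B (Python) =====
-- def coverage_to_coordinates(coverage_list):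
--     n = len(coverage_list)
--     prev = coverage_list[0]
--     points = [(0, prev)]
--     for i in range(1, n):
--         depth = coverage_list[i]
--         if depth != prev or i == n - 1:
--             if points[-1][0] != i - 1:
--                 points.append((i - 1, prev))
--             points.append((i, depth))
--             prev = depth
--     return points
-- ===== Notes on version B (the rewrite author's own statement) =====
-- stated objective: faster
-- what changed: B emits transition points in one pass, already in ascending index order with an adjacent-duplicate check, instead of accumulating them in a set and sorting it.
-- intended difference: On single-element lists A returns two points, the first carrying a bogus out-of-range x-coordinate -1 produced by i-1 at i=0, while B returns just the one real point at x=0, the intended result. — e.g. on coverage_to_coordinates([5]): A returns [(-1, 5), (0, 5)], B returns [(0, 5)]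
import Mathlib
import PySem

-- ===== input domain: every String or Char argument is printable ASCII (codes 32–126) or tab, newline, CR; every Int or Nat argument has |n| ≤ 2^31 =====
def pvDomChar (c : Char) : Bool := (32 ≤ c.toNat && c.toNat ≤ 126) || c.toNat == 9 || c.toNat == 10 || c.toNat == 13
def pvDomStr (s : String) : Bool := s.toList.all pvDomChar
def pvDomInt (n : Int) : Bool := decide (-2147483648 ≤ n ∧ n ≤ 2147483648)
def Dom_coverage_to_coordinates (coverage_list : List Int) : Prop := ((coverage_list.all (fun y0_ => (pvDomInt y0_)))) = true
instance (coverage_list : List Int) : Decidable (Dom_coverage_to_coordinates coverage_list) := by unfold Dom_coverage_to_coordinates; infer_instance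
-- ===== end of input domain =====

-- B replaces A's set-accumulate-then-sort by a single pass that appends the
-- transition points already in ascending x order (adjacent-duplicate check), O(n) vs O(n log n).
-- (The final sorted(...) in A has an injective key on the accumulated set — no ties — so the
-- port through PySem.List.sorted is exact despite the unmodelled set iteration order.)

-- ===== PORT A =====
def coverage_to_coordinates (coverage_list : List Int) : List (Int × Int) :=
  let previous_depth := PySem.List.pyGetD coverage_list 0 0
  let coordinates : PySem.Set (Int × Int) := PySem.Set.ofList [((0 : Int), previous_depth)]
  let last : Int := (coverage_list.length : Int) - 1
  let st :=
    (PySem.List.enumerate coverage_list 0).foldl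
      (fun (st : PySem.Set (Int × Int) × Int) (p : Int × Int) =>
        if p.2 ≠ st.2 ∨ p.1 = last then
          (PySem.Set.add (PySem.Set.add st.1 (p.1 - 1, st.2)) (p.1, p.2), p.2)
        else st)
      (coordinates, previous_depth)
  PySem.List.sorted st.1 (fun x => x.1) false

-- ===== PORT B =====
def coverage_to_coordinates_alt (coverage_list : List Int) : List (Int × Int) :=
  let n : Int := (coverage_list.length : Int)
  let prev := PySem.List.pyGetD coverage_list 0 0
  let st :=
    (PySem.List.pyRange 1 n 1).foldl
      (fun (st : List (Int × Int) × Int) (i : Int) =>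
        let depth := PySem.List.pyGetD coverage_list i 0
        if depth ≠ st.2 ∨ i = n - 1 then
          ((if (PySem.List.pyGetD st.1 (-1) (0, 0)).1 ≠ i - 1 then st.1 ++ [(i - 1, st.2)] else st.1)
              ++ [(i, depth)], depth)
        else st)
      ([((0 : Int), prev)], prev)
  st.1

-- ===== PRECONDITION & SPEC =====
-- A (and B) index coverage_list[0]: the empty list raises IndexError in both, so it is excluded.
def Pre_coverage_to_coordinates (coverage_list : List Int) : Prop := coverage_list ≠ []
instance (coverage_list : List Int) : Decidable (Pre_coverage_to_coordinates coverage_list) := by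
  unfold Pre_coverage_to_coordinates; infer_instance

def pvWitness_coverage_to_coordinates : List Int := [1, 1, 2]

-- On single-element lists A returns two points, the first carrying a bogus out-of-range
-- x-coordinate -1 produced by i-1 at i=0, while B returns just the one real point at x=0,
-- the intended result.
def D_coverage_to_coordinates (coverage_list : List Int) : Prop := coverage_list.length = 1
instance (coverage_list : List Int) : Decidable (D_coverage_to_coordinates coverage_list) := by
  unfold D_coverage_to_coordinates; infer_instance

def Spec_coverage_to_coordinates (coverage_list : List Int) (out : List (Int × Int)) : Prop :=
  ¬ D_coverage_to_coordinates coverage_list → out = coverage_to_coordinates_alt coverage_list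
instance (coverage_list : List Int) (out : List (Int × Int)) : Decidable (Spec_coverage_to_coordinates coverage_list out) := by
  unfold Spec_coverage_to_coordinates; infer_instance

def pvDiffWitness_coverage_to_coordinates : List Int := [5]
def pvDiffWitnessOut_coverage_to_coordinates : (List (Int × Int)) × (List (Int × Int)) :=
  ([(-1, 5), (0, 5)], [(0, 5)])

-- ===== CLAIM (what is proved, stated in full; the proofs are below) =====
def Claim_unchanged_coverage_to_coordinates : Prop := ∀ (coverage_list : List Int), Dom_coverage_to_coordinates coverage_list → Pre_coverage_to_coordinates coverage_list → Spec_coverage_to_coordinates coverage_list (coverage_to_coordinates coverage_list)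
def Claim_changed_coverage_to_coordinates : Prop := Dom_coverage_to_coordinates (pvDiffWitness_coverage_to_coordinates) ∧ Pre_coverage_to_coordinates (pvDiffWitness_coverage_to_coordinates) ∧ D_coverage_to_coordinates (pvDiffWitness_coverage_to_coordinates) ∧ coverage_to_coordinates (pvDiffWitness_coverage_to_coordinates) = pvDiffWitnessOut_coverage_to_coordinates.1 ∧ coverage_to_coordinates_alt (pvDiffWitness_coverage_to_coordinates) = pvDiffWitnessOut_coverage_to_coordinates.2 ∧ pvDiffWitnessOut_coverage_to_coordinates.1 ≠ pvDiffWitnessOut_coverage_to_coordinates.2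
def Claim_exact_coverage_to_coordinates : Prop := ∀ (coverage_list : List Int), Dom_coverage_to_coordinates coverage_list → Pre_coverage_to_coordinates coverage_list → D_coverage_to_coordinates coverage_list → coverage_to_coordinates coverage_list ≠ coverage_to_coordinates_alt coverage_list

-- ===== LEMMAS AND PROOFS =====

-- The shared loop body of A's port (state: accumulated set, previous depth).
def stepA (L : Int) (st : PySem.Set (Int × Int) × Int) (p : Int × Int) : PySem.Set (Int × Int) × Int :=
  if p.2 ≠ st.2 ∨ p.1 = L then
    (PySem.Set.add (PySem.Set.add st.1 (p.1 - 1, st.2)) (p.1, p.2), p.2)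
  else st

-- The loop body of B's port, abstracted over the current depth value.
def stepB (L : Int) (st : List (Int × Int) × Int) (i : Int) (depth : Int) : List (Int × Int) × Int :=
  if depth ≠ st.2 ∨ i = L then
    ((if (PySem.List.pyGetD st.1 (-1) (0, 0)).1 ≠ i - 1 then st.1 ++ [(i - 1, st.2)] else st.1)
        ++ [(i, depth)], depth)
  else st

-- Loop invariant: the accumulated list is nonempty, strictly increasing in x, its last
-- x-coordinate dominates and is below the next index i, and if that x is i-1 the last
-- point is exactly (i-1, prev).
def LoopInv (s : List (Int × Int)) (prev i : Int) : Prop :=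
  s ≠ [] ∧ s.Pairwise (fun a b => a.1 < b.1) ∧
  (∀ p ∈ s, p.1 ≤ (s.getLastD (0, 0)).1) ∧
  (s.getLastD (0, 0)).1 < i ∧
  ((s.getLastD (0, 0)).1 = i - 1 → s.getLastD (0, 0) = (i - 1, prev))

lemma getLastD_mem (l : List (Int × Int)) (d : Int × Int) (h : l ≠ []) : l.getLastD d ∈ l := by
  cases l with
  | nil => simp at h
  | cons x xs =>
    simp [List.getLastD_eq_getLast?, List.getLast?_eq_some_getLast (List.cons_ne_nil x xs)]

lemma pyGetD_neg_one_eq_getLastD (l : List (Int × Int)) (d : Int × Int) (h : l ≠ []) :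
    PySem.List.pyGetD l (-1) d = l.getLastD d := by
  rw [PySem.List.pyGetD_neg_one l d h]
  simp [List.getLastD_eq_getLast?, List.getLast?_eq_some_getLast h]

lemma lastFst_mem_iff (s : List (Int × Int)) (prev i : Int) (h : LoopInv s prev i) :
    ((i - 1, prev) ∈ s) ↔ (s.getLastD (0, 0)).1 = i - 1 := by
  obtain ⟨hne, hpw, hle, hlt, hlast⟩ := h
  constructor
  · intro hm
    have h1 := hle _ hm
    simp only at h1
    omega
  · intro he
    have h2 := hlast he
    rw [← h2]
    exact getLastD_mem s _ hne

lemma inv_extend (s t : List (Int × Int)) (prev i d : Int) (h : LoopInv s prev i)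
    (ht : t = [] ∨ (t = [(i - 1, prev)] ∧ (s.getLastD (0, 0)).1 < i - 1)) :
    LoopInv ((s ++ t) ++ [(i, d)]) d (i + 1) := by
  obtain ⟨hne, hpw, hle, hlt, hlast⟩ := h
  have hto : ∀ p ∈ s, p.1 < i := fun p hp => lt_of_le_of_lt (hle p hp) hlt
  have hts : ∀ p ∈ s ++ t, p.1 < i := by
    intro p hp
    rcases List.mem_append.1 hp with hp | hp
    · exact hto p hp
    · rcases ht with rfl | ⟨rfl, _⟩
      · simp at hp
      · simp at hp
        rw [hp]
        omega
  refine ⟨by simp, ?_, ?_, ?_, ?_⟩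
  · rw [List.pairwise_append]
    refine ⟨?_, by simp, ?_⟩
    · rw [List.pairwise_append]
      refine ⟨hpw, by rcases ht with rfl | ⟨rfl, _⟩ <;> simp, ?_⟩
      intro a ha b hb
      rcases ht with rfl | ⟨rfl, hlt2⟩
      · simp at hb
      · simp at hb
        rw [hb]
        have := hle a ha
        simp only
        omega
    · intro a ha b hb
      simp at hb
      rw [hb]
      exact hts a ha
  · intro p hp
    rw [List.getLastD_concat]
    rcases List.mem_append.1 hp with hp | hp
    · exact le_of_lt (hts p hp)
    · simp at hp; rw [hp]
  · rw [List.getLastD_concat]; simp only; omega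
  · intro _; rw [List.getLastD_concat]; norm_num

lemma step_inv (L i prev d : Int) (s : List (Int × Int)) (h : LoopInv s prev i) :
    stepA L (s, prev) (i, d) = stepB L (s, prev) i d ∧
    LoopInv (stepA L (s, prev) (i, d)).1 (stepA L (s, prev) (i, d)).2 (i + 1) := by
  obtain ⟨hne, hpw, hle, hlt, hlast⟩ := h
  have hto : ∀ p ∈ s, p.1 < i := fun p hp => lt_of_le_of_lt (hle p hp) hlt
  unfold stepA stepB
  by_cases hc : d ≠ prev ∨ i = L
  · simp only [if_pos hc]
    rw [pyGetD_neg_one_eq_getLastD s (0, 0) hne]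
    by_cases hl : (s.getLastD (0, 0)).1 = i - 1
    · have hmem : (i - 1, prev) ∈ s := (lastFst_mem_iff s prev i ⟨hne, hpw, hle, hlt, hlast⟩).2 hl
      have ha1 : PySem.Set.add s (i - 1, prev) = s := by simp [PySem.Set.add, hmem]
      have hnm : (i, d) ∉ s := fun hm => absurd (hto _ hm) (by simp)
      have ha2 : PySem.Set.add s (i, d) = s ++ [(i, d)] := by simp [PySem.Set.add, hnm]
      rw [ha1, ha2]
      constructor
      · rw [if_neg (not_not_intro hl)]
      · have := inv_extend s [] prev i d ⟨hne, hpw, hle, hlt, hlast⟩ (Or.inl rfl)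
        simpa using this
    · have hmem : (i - 1, prev) ∉ s := fun hm =>
        hl ((lastFst_mem_iff s prev i ⟨hne, hpw, hle, hlt, hlast⟩).1 hm)
      have ha1 : PySem.Set.add s (i - 1, prev) = s ++ [(i - 1, prev)] := by
        simp [PySem.Set.add, hmem]
      have hnm : (i, d) ∉ s ++ [(i - 1, prev)] := by
        intro hm
        rcases List.mem_append.1 hm with hm | hm
        · exact absurd (hto _ hm) (by simp)
        · simp at hm; omega
      have ha2 : PySem.Set.add (s ++ [(i - 1, prev)]) (i, d) = (s ++ [(i - 1, prev)]) ++ [(i, d)] := by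
        simp only [PySem.Set.add]
        rw [if_neg (by simpa using hnm)]
      rw [ha1, ha2]
      constructor
      · rw [if_pos hl]
      · exact inv_extend s [(i - 1, prev)] prev i d ⟨hne, hpw, hle, hlt, hlast⟩
          (Or.inr ⟨rfl, by omega⟩)
  · simp only [if_neg hc]
    unfold LoopInv
    exact ⟨trivial, hne, hpw, hle, by omega, fun he => absurd he (by omega)⟩

lemma core (L : Int) : ∀ (rest : List Int) (i : Int) (s : List (Int × Int)) (prev : Int),
    LoopInv s prev i →
    (PySem.List.enumerate rest i).foldl (stepA L) (s, prev)
      = (PySem.List.enumerate rest i).foldl (fun st p => stepB L st p.1 p.2) (s, prev)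
    ∧ LoopInv ((PySem.List.enumerate rest i).foldl (stepA L) (s, prev)).1
        ((PySem.List.enumerate rest i).foldl (stepA L) (s, prev)).2 (i + rest.length) := by
  intro rest
  induction rest with
  | nil =>
    intro i s prev h
    simpa [PySem.List.enumerate_nil] using h
  | cons x rest ih =>
    intro i s prev h
    rw [PySem.List.enumerate_cons, List.foldl_cons, List.foldl_cons]
    obtain ⟨heq, hinv⟩ := step_inv L i prev x s h
    have hst : stepA L (s, prev) (i, x) = ((stepA L (s, prev) (i, x)).1, (stepA L (s, prev) (i, x)).2) := rfl
    rw [← heq]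
    rw [hst] at hinv ⊢
    obtain ⟨h1, h2⟩ := ih (i + 1) _ _ hinv
    refine ⟨h1, ?_⟩
    have : i + 1 + (rest.length : Int) = i + ((rest.length : Int) + 1) := by ring
    rw [this] at h2
    simpa using h2

-- range-with-indexing fold = enumerate fold, on the suffix from j (fuel induction)
lemma range_index_fold_aux {σ : Type} (cl : List Int) (g : σ → Int → Int → σ) :
    ∀ (k j : Nat) (init : σ), cl.length ≤ j + k →
    (PySem.List.pyRange (j : Int) (cl.length : Int) 1).foldl
        (fun st i => g st i (PySem.List.pyGetD cl i 0)) init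
      = (PySem.List.enumerate (cl.drop j) (j : Int)).foldl (fun st p => g st p.1 p.2) init := by
  intro k
  induction k with
  | zero =>
    intro j init hle
    rw [PySem.List.pyRange_one_eq_nil (by exact_mod_cast hle),
        List.drop_eq_nil_of_le (by omega), PySem.List.enumerate_nil, List.foldl_nil]
    rfl
  | succ k ih =>
    intro j init hle
    by_cases h : j < cl.length
    · rw [PySem.List.pyRange_one_cons (by exact_mod_cast h), List.foldl_cons,
          List.drop_eq_getElem_cons h, PySem.List.enumerate_cons, List.foldl_cons]
      have hget : PySem.List.pyGetD cl (j : Int) 0 = cl[j] := by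
        rw [PySem.List.pyGetD_eq_getElem _ _ (by positivity) (by exact_mod_cast h)]
        simp
      rw [hget]
      have := ih (j + 1) (g init (j : Int) cl[j]) (by omega)
      push_cast at this ⊢
      exact this
    · rw [PySem.List.pyRange_one_eq_nil (by exact_mod_cast Nat.le_of_not_lt h),
          List.drop_eq_nil_of_le (by omega), PySem.List.enumerate_nil, List.foldl_nil]
      rfl

lemma range_index_fold {σ : Type} (cl : List Int) (g : σ → Int → Int → σ) (j : Nat) (init : σ) :
    (PySem.List.pyRange (j : Int) (cl.length : Int) 1).foldl
        (fun st i => g st i (PySem.List.pyGetD cl i 0)) init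
      = (PySem.List.enumerate (cl.drop j) (j : Int)).foldl (fun st p => g st p.1 p.2) init :=
  range_index_fold_aux cl g cl.length j init (by omega)

lemma main_eq (c c2 : Int) (tl2 : List Int) :
    coverage_to_coordinates (c :: c2 :: tl2) = coverage_to_coordinates_alt (c :: c2 :: tl2) := by
  have hpd : PySem.List.pyGetD (c :: c2 :: tl2) 0 0 = c := by simp [PySem.List.pyGetD_zero_cons]
  have hA : coverage_to_coordinates (c :: c2 :: tl2) =
      PySem.List.sorted
        ((PySem.List.enumerate (c :: c2 :: tl2) 0).foldl
          (stepA (((c :: c2 :: tl2).length : Int) - 1))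
          ([((0 : Int), PySem.List.pyGetD (c :: c2 :: tl2) 0 0)],
            PySem.List.pyGetD (c :: c2 :: tl2) 0 0)).1
        (fun x => x.1) false := rfl
  have hB : coverage_to_coordinates_alt (c :: c2 :: tl2) =
      ((PySem.List.pyRange 1 (((c :: c2 :: tl2).length : Int)) 1).foldl
        (fun st i => stepB (((c :: c2 :: tl2).length : Int) - 1) st i
          (PySem.List.pyGetD (c :: c2 :: tl2) i 0))
        ([((0 : Int), PySem.List.pyGetD (c :: c2 :: tl2) 0 0)],
          PySem.List.pyGetD (c :: c2 :: tl2) 0 0)).1 := rfl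
  rw [hA, hB, hpd]
  have hrif := range_index_fold (c :: c2 :: tl2)
    (stepB (((c :: c2 :: tl2).length : Int) - 1)) 1 ([((0 : Int), c)], c)
  simp only [Nat.cast_one, List.drop_succ_cons, List.drop_zero] at hrif
  rw [hrif]
  rw [show PySem.List.enumerate (c :: c2 :: tl2) 0
        = ((0 : Int), c) :: PySem.List.enumerate (c2 :: tl2) 1 from by
      simp [PySem.List.enumerate_cons]]
  rw [List.foldl_cons]
  have hstep0 : stepA (((c :: c2 :: tl2).length : Int) - 1) ([((0 : Int), c)], c) ((0 : Int), c)
      = ([((0 : Int), c)], c) := by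
    unfold stepA
    rw [if_neg]
    rintro (h | h)
    · exact h rfl
    · simp at h
      omega
  rw [hstep0]
  have hinv : LoopInv [((0 : Int), c)] c 1 := by
    unfold LoopInv
    refine ⟨by simp, by simp, by simp [List.getLastD], by simp [List.getLastD],
      by simp [List.getLastD]⟩
  obtain ⟨heq, hfin⟩ := core (((c :: c2 :: tl2).length : Int) - 1) (c2 :: tl2) 1
    [((0 : Int), c)] c hinv
  rw [← heq]
  exact PySem.List.sorted_eq_of_perm_of_pairwise_lt _ _ _ (List.Perm.refl _) hfin.2.1

-- ===== VERDICT (by name: the statement is the Claim_ definition above) =====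
theorem coverage_to_coordinates_spec : Claim_unchanged_coverage_to_coordinates := by
  intro cl hdom hpre
  unfold Spec_coverage_to_coordinates
  intro hnd
  rcases cl with _ | ⟨c, _ | ⟨c2, tl2⟩⟩
  · exact absurd rfl hpre
  · exact absurd (by unfold D_coverage_to_coordinates; simp) hnd
  · exact main_eq c c2 tl2

theorem coverage_to_coordinates_changed : Claim_changed_coverage_to_coordinates := by
  unfold Claim_changed_coverage_to_coordinates; decide

theorem coverage_to_coordinates_tight : Claim_exact_coverage_to_coordinates := by
  intro cl _ _ hD
  unfold D_coverage_to_coordinates at hD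
  rcases cl with _ | ⟨c, _ | ⟨c2, tl2⟩⟩
  · simp at hD
  · intro heq
    have h1 : coverage_to_coordinates [c]
        = PySem.List.sorted [((0 : Int), c), (-1, c)] (fun x => x.1) false := by
      unfold coverage_to_coordinates
      simp [PySem.List.enumerate_cons, PySem.Set.add, PySem.Set.ofList, List.foldl, PySem.List.pyGetD_zero_cons]
    have h2 : coverage_to_coordinates_alt [c] = [((0 : Int), c)] := by
      unfold coverage_to_coordinates_alt
      simp [PySem.List.pyRange_one_eq_nil]
    have hlen := congrArg List.length heq
    rw [h1, h2, PySem.List.length_sorted] at hlen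
    simp at hlen
  · simp at hD
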